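-- pv_equiv track=rewrite | github.com/vzpd/myBrushRecord | exercise/练习_快速公交.py | busRapidTransit
-- ===== SOURCE A (Python) =====
-- from functools import lru_cache
-- from typing import List
--
-- def busRapidTransit(target: int, inc: int, dec: int, jump: List[int], cost: List[int]) -> int:
--     MOD = 1000000007
--
--     @lru_cache(None)
--     def helper(k):
--         if k == 0:
--             return 0
--         if k == 1:
--             return inc
--         r = k * inc
--         for d, c in zip(jump, cost):
--             m = k % d
--             r = min(r, m * inc + c + helper(k // d))
--             if m:
--                 r = min(r, (d - m) * dec + c + helper(k // d + 1))
--
--         return r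
--
--     return helper(target) % MOD
-- ===== SOURCE B (Python) =====
-- from typing import List
--
-- def busRapidTransit(target: int, inc: int, dec: int, jump: List[int], cost: List[int]) -> int:
--     MOD = 1000000007
--     # phase 1: collect the set of reachable states (DFS from target)
--     seen = set()
--
--     def reach(k):
--         if k in seen:
--             return
--         seen.add(k)
--         if k > 1:
--             for d in jump:
--                 reach(k // d)
--                 if k % d:
--                     reach(k // d + 1)
--
--     reach(target)
--     # phase 2: bottom-up DP over the states in ascending order
--     dp = {}
--     for k in sorted(seen):
--         if k == 0:
--             dp[k] = 0
--         elif k == 1: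
--             dp[k] = inc
--         else:
--             r = k * inc
--             for d, c in zip(jump, cost):
--                 m = k % d
--                 r = min(r, m * inc + c + dp[k // d])
--                 if m:
--                     r = min(r, (d - m) * dec + c + dp[k // d + 1])
--             dp[k] = r
--     return dp[target] % MOD
-- ===== Notes on version B (the rewrite author's own statement) =====
-- stated objective: alternative
-- what changed: Replaces the lru_cache top-down value recursion by a two-phase algorithm: first collect the set of reachable states from target, then fill a dict bottom-up over the states sorted ascending and read off dp[target].
-- outside the precondition, e.g. on busRapidTransit(2, 1, 1, [-2], [1]): A returns 0, B raises KeyError; on busRapidTransit(5, 1, 1, [0], []): A returns 5, B raises ZeroDivisionError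
import Mathlib
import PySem

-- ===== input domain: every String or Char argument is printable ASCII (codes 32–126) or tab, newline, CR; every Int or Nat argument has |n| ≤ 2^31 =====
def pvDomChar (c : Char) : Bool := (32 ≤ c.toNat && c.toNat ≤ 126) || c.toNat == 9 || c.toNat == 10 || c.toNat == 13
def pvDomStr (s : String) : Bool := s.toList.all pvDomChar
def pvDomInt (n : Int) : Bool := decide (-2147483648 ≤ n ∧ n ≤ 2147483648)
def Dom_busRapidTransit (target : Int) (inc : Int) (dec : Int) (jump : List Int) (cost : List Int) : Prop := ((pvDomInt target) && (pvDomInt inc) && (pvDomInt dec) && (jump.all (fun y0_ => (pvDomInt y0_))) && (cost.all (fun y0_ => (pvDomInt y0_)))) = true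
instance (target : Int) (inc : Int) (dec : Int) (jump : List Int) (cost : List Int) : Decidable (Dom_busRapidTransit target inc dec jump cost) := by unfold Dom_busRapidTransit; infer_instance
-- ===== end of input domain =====

-- B replaces A's memoized top-down recursion by an explicit two-phase bottom-up DP
-- (collect reachable states, then fill a dict in ascending state order): a different
-- decomposition of the same recurrence ("alternative" objective, no speed claim).

-- ===== PORT A =====
-- the lru_cache recursion; the Nat fuel only totalizes it (inside Pre_ every recursive
-- argument is strictly smaller and nonnegative, so fuel target.toNat+1 is never exhausted)
def pvHelperA (inc dec : Int) (jc : List (Int × Int)) : Nat → Int → Int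
  | 0, _ => 0
  | f+1, k =>
    if k = 0 then 0
    else if k = 1 then inc
    else jc.foldl (fun r dc =>
      let m := PySem.Int.mod k dc.1
      let r1 := min r (m * inc + dc.2 + pvHelperA inc dec jc f (PySem.Int.floordiv k dc.1))
      if m ≠ 0 then
        min r1 ((dc.1 - m) * dec + dc.2 + pvHelperA inc dec jc f (PySem.Int.floordiv k dc.1 + 1))
      else r1)
      (k * inc)

def busRapidTransit (target : Int) (inc : Int) (dec : Int) (jump : List Int) (cost : List Int) : Int :=
  PySem.Int.mod (pvHelperA inc dec (jump.zip cost) (target.toNat + 1) target) 1000000007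

-- ===== PORT B =====
-- phase 1: `reach` — DFS collecting the set of states reachable from target
-- (fuel only totalizes the recursion, exactly as in port A)
def pvReach (jump : List Int) : Nat → Int → PySem.Set Int → PySem.Set Int
  | 0, _, seen => seen
  | f+1, k, seen =>
    if k ∈ seen then seen
    else
      let seen1 := PySem.Set.add seen k
      if 1 < k then
        jump.foldl (fun s d =>
          let s1 := pvReach jump f (PySem.Int.floordiv k d) s
          if PySem.Int.mod k d ≠ 0 then pvReach jump f (PySem.Int.floordiv k d + 1) s1 else s1)
          seen1
      else seen1

-- phase 2: bottom-up fill of dp over the sorted states.  Python's dp[k//d] raises KeyError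
-- on a missing key; inside Pre_ the key is always present (proved below), so getD's
-- default 0 is never read.
def pvFill (inc dec : Int) (jc : List (Int × Int)) : List Int → PySem.Dict Int Int → PySem.Dict Int Int
  | [], dp => dp
  | k :: rest, dp =>
    let dp' :=
      if k = 0 then dp.insert k 0
      else if k = 1 then dp.insert k inc
      else dp.insert k (jc.foldl (fun r dc =>
        let m := PySem.Int.mod k dc.1
        let r1 := min r (m * inc + dc.2 + dp.getD (PySem.Int.floordiv k dc.1) 0)
        if m ≠ 0 then
          min r1 ((dc.1 - m) * dec + dc.2 + dp.getD (PySem.Int.floordiv k dc.1 + 1) 0)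
        else r1)
        (k * inc))
    pvFill inc dec jc rest dp'

def busRapidTransit_alt (target : Int) (inc : Int) (dec : Int) (jump : List Int) (cost : List Int) : Int :=
  let seen := pvReach jump (target.toNat + 1) target PySem.Set.empty
  let dp := pvFill inc dec (jump.zip cost) (PySem.List.sorted seen (fun x => x) false) PySem.Dict.empty
  PySem.Int.mod (dp.getD target 0) 1000000007

-- ===== PRECONDITION & SPEC =====
-- Pre_ restricts to the inputs where A's recursion is well-founded: the problem's
-- natural domain (target ≥ 0, every jump factor ≥ 2) plus the trivial inputs (target
-- 0 or 1, or no jump lines) on which the factors are never used; outside it A raises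
-- RecursionError/ZeroDivisionError on all but accidental corners (e.g. negative
-- factors, or an empty cost list with a zero factor), which B does not reproduce.
def Pre_busRapidTransit (target : Int) (inc : Int) (dec : Int) (jump : List Int) (cost : List Int) : Prop :=
  (0 ≤ target ∧ ∀ d ∈ jump, 2 ≤ d) ∨ target = 0 ∨ target = 1 ∨ jump = []
instance (target : Int) (inc : Int) (dec : Int) (jump : List Int) (cost : List Int) : Decidable (Pre_busRapidTransit target inc dec jump cost) := by unfold Pre_busRapidTransit; infer_instance

def pvWitness_busRapidTransit : Int × Int × Int × List Int × List Int := (10, 2, 3, [4], [5])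

def Spec_busRapidTransit (target : Int) (inc : Int) (dec : Int) (jump : List Int) (cost : List Int) (out : Int) : Prop := out = busRapidTransit_alt target inc dec jump cost
instance (target : Int) (inc : Int) (dec : Int) (jump : List Int) (cost : List Int) (out : Int) : Decidable (Spec_busRapidTransit target inc dec jump cost out) := by unfold Spec_busRapidTransit; infer_instance

-- ===== CLAIM (what is proved, stated in full; the proofs are below) =====
def Claim_equal_busRapidTransit : Prop := ∀ (target : Int) (inc : Int) (dec : Int) (jump : List Int) (cost : List Int), Dom_busRapidTransit target inc dec jump cost → Pre_busRapidTransit target inc dec jump cost → Spec_busRapidTransit target inc dec jump cost (busRapidTransit target inc dec jump cost)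

-- ===== LEMMAS AND PROOFS =====

-- the value A's recursion denotes (helperA with just enough fuel)
def pvH (inc dec : Int) (jc : List (Int × Int)) (k : Int) : Int :=
  pvHelperA inc dec jc (k.toNat + 1) k

-- arithmetic on one recursion step: both children are nonnegative and strictly smaller
theorem pvChild_lt {k d : Int} (hk : 2 ≤ k) (hd : 2 ≤ d) :
    0 ≤ PySem.Int.floordiv k d ∧ (PySem.Int.floordiv k d).toNat < k.toNat ∧
      (PySem.Int.mod k d ≠ 0 →
        (PySem.Int.floordiv k d + 1).toNat < k.toNat) := by
  have h0 : 0 < d := by omega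
  have hid := PySem.Int.floordiv_mul_add_mod k d
  have hm0 : 0 ≤ PySem.Int.mod k d := PySem.Int.mod_nonneg k h0
  have hmlt : PySem.Int.mod k d < d := PySem.Int.mod_lt k h0
  set q := PySem.Int.floordiv k d with hq
  set m := PySem.Int.mod k d with hm
  have hq0 : 0 ≤ q := by
    by_contra h
    have h1 : q ≤ -1 := by omega
    have := mul_le_mul_of_nonneg_right h1 (by omega : (0:Int) ≤ d)
    omega
  have h2q : q * 2 ≤ q * d := mul_le_mul_of_nonneg_left hd hq0
  refine ⟨hq0, by omega, fun hmne => ?_⟩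
  have : 1 ≤ m := by omega
  omega

theorem pvHelperA_fuel (inc dec : Int) (jc : List (Int × Int))
    (hj : ∀ dc ∈ jc, 2 ≤ dc.1) :
    ∀ N : Nat, ∀ k : Int, ∀ f : Nat, 0 ≤ k → k.toNat ≤ N → k.toNat < f →
      pvHelperA inc dec jc f k = pvH inc dec jc k := by
  intro N
  induction N with
  | zero =>
    intro k f h0 hN hf
    have hk : k = 0 := by omega
    obtain ⟨f', rfl⟩ : ∃ f', f = f' + 1 := ⟨f - 1, by omega⟩
    subst hk
    simp [pvHelperA, pvH]
  | succ N ih =>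
    intro k f h0 hN hf
    obtain ⟨f', rfl⟩ : ∃ f', f = f' + 1 := ⟨f - 1, by omega⟩
    by_cases hk0 : k = 0
    · subst hk0; simp [pvHelperA, pvH]
    by_cases hk1 : k = 1
    · subst hk1; simp [pvHelperA, pvH]
    have hk2 : 2 ≤ k := by omega
    have hkt : k.toNat + 1 = k.toNat + 1 := rfl
    show pvHelperA inc dec jc (f' + 1) k = pvHelperA inc dec jc (k.toNat + 1) k
    simp only [pvHelperA, if_neg hk0, if_neg hk1]
    refine PySem.List.foldl_congr_mem _ _ _ _ (fun r dc hmem => ?_)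
    have hd : 2 ≤ dc.1 := hj dc hmem
    obtain ⟨hq0, hqlt, hq1lt⟩ := pvChild_lt hk2 hd
    have e1 : pvHelperA inc dec jc f' (PySem.Int.floordiv k dc.1)
        = pvHelperA inc dec jc k.toNat (PySem.Int.floordiv k dc.1) := by
      rw [ih _ f' hq0 (by omega) (by omega), ih _ k.toNat hq0 (by omega) (by omega)]
    by_cases hm : PySem.Int.mod k dc.1 = 0
    · simp only [hm, ne_eq, not_true_eq_false, if_false, e1]
    · have e2 : pvHelperA inc dec jc f' (PySem.Int.floordiv k dc.1 + 1)
          = pvHelperA inc dec jc k.toNat (PySem.Int.floordiv k dc.1 + 1) := by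
        have h1 := hq1lt hm
        rw [ih _ f' (by omega) (by omega) (by omega),
            ih _ k.toNat (by omega) (by omega) (by omega)]
      simp only [hm, ne_eq, not_false_eq_true, if_true, e1, e2]

theorem pvH_zero (inc dec : Int) (jc : List (Int × Int)) : pvH inc dec jc 0 = 0 := by
  simp [pvH, pvHelperA]

theorem pvH_one (inc dec : Int) (jc : List (Int × Int)) : pvH inc dec jc 1 = inc := by
  simp [pvH, pvHelperA]

-- the recurrence pvH satisfies for k ≥ 2
theorem pvH_recur (inc dec : Int) (jc : List (Int × Int)) (hj : ∀ dc ∈ jc, 2 ≤ dc.1)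
    {k : Int} (hk : 2 ≤ k) :
    pvH inc dec jc k = jc.foldl (fun r dc =>
      let m := PySem.Int.mod k dc.1
      let r1 := min r (m * inc + dc.2 + pvH inc dec jc (PySem.Int.floordiv k dc.1))
      if m ≠ 0 then
        min r1 ((dc.1 - m) * dec + dc.2 + pvH inc dec jc (PySem.Int.floordiv k dc.1 + 1))
      else r1) (k * inc) := by
  have hk0 : ¬ k = 0 := by omega
  have hk1 : ¬ k = 1 := by omega
  show pvHelperA inc dec jc (k.toNat + 1) k = _
  simp only [pvHelperA, if_neg hk0, if_neg hk1]
  refine PySem.List.foldl_congr_mem _ _ _ _ (fun r dc hmem => ?_)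
  have hd : 2 ≤ dc.1 := hj dc hmem
  obtain ⟨hq0, hqlt, hq1lt⟩ := pvChild_lt hk hd
  have e1 : pvHelperA inc dec jc k.toNat (PySem.Int.floordiv k dc.1)
      = pvH inc dec jc (PySem.Int.floordiv k dc.1) :=
    pvHelperA_fuel inc dec jc hj k.toNat _ _ hq0 (by omega) (by omega)
  by_cases hm : PySem.Int.mod k dc.1 = 0
  · simp only [hm, ne_eq, not_true_eq_false, if_false, e1]
  · have e2 : pvHelperA inc dec jc k.toNat (PySem.Int.floordiv k dc.1 + 1)
        = pvH inc dec jc (PySem.Int.floordiv k dc.1 + 1) := by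
      have h1 := hq1lt hm
      exact pvHelperA_fuel inc dec jc hj k.toNat _ _ (by omega) (by omega) (by omega)
    simp only [hm, ne_eq, not_false_eq_true, if_true, e1, e2]

-- "k is closed in S": k needs no children, or all its children are in S
def pvOk (jump : List Int) (S : List Int) (k : Int) : Prop :=
  k ≤ 1 ∨ ∀ d ∈ jump, PySem.Int.floordiv k d ∈ S ∧
    (PySem.Int.mod k d ≠ 0 → PySem.Int.floordiv k d + 1 ∈ S)

theorem pvOk_mono {jump S S' : List Int} {k : Int}
    (hsub : ∀ x ∈ S, x ∈ S') (h : pvOk jump S k) : pvOk jump S' k := by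
  rcases h with h | h
  · exact Or.inl h
  · exact Or.inr fun d hd => ⟨hsub _ (h d hd).1, fun hm => hsub _ ((h d hd).2 hm)⟩

theorem pvReach_spec (jump : List Int) (hj : ∀ d ∈ jump, 2 ≤ d) :
    ∀ f : Nat, ∀ k : Int, ∀ seen : PySem.Set Int, ∀ E : Int → Prop,
      0 ≤ k → k.toNat < f →
      (∀ j ∈ seen, 0 ≤ j) → (∀ j ∈ seen, E j ∨ pvOk jump seen j) → seen.Nodup →
      (∀ j ∈ seen, j ∈ pvReach jump f k seen) ∧ k ∈ pvReach jump f k seen ∧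
      (∀ j ∈ pvReach jump f k seen, 0 ≤ j) ∧
      (∀ j ∈ pvReach jump f k seen, E j ∨ pvOk jump (pvReach jump f k seen) j) ∧
      (pvReach jump f k seen).Nodup := by
  intro f
  induction f with
  | zero => intro k seen E h0 hf; omega
  | succ f ih =>
    intro k seen E h0 hf hs0 hsE hnd
    by_cases hseen : k ∈ seen
    · simp only [pvReach, if_pos hseen]
      exact ⟨fun j hj => hj, hseen, hs0, hsE, hnd⟩
    simp only [pvReach, if_neg hseen]
    have hmem1 : ∀ j, j ∈ PySem.Set.add seen k ↔ j ∈ seen ∨ j = k := by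
      intro j; exact PySem.Set.mem_add seen k j
    have hnd1 : (PySem.Set.add seen k).Nodup := PySem.Set.nodup_add seen k hnd
    by_cases hk1 : 1 < k
    · simp only [if_pos hk1]
      -- generalized claim over any prefix list l of jump factors
      have key : ∀ l : List Int, (∀ d ∈ l, 2 ≤ d) →
          ∀ s : PySem.Set Int, (∀ j ∈ s, 0 ≤ j) →
            (∀ j ∈ s, (j = k ∨ E j) ∨ pvOk jump s j) → s.Nodup →
          (∀ j ∈ s, j ∈ l.foldl (fun s d =>
              let s1 := pvReach jump f (PySem.Int.floordiv k d) s
              if PySem.Int.mod k d ≠ 0 then pvReach jump f (PySem.Int.floordiv k d + 1) s1 else s1) s) ∧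
          (∀ j ∈ l.foldl (fun s d =>
              let s1 := pvReach jump f (PySem.Int.floordiv k d) s
              if PySem.Int.mod k d ≠ 0 then pvReach jump f (PySem.Int.floordiv k d + 1) s1 else s1) s, 0 ≤ j) ∧
          (∀ j ∈ l.foldl (fun s d =>
              let s1 := pvReach jump f (PySem.Int.floordiv k d) s
              if PySem.Int.mod k d ≠ 0 then pvReach jump f (PySem.Int.floordiv k d + 1) s1 else s1) s,
            (j = k ∨ E j) ∨ pvOk jump (l.foldl (fun s d =>
              let s1 := pvReach jump f (PySem.Int.floordiv k d) s
              if PySem.Int.mod k d ≠ 0 then pvReach jump f (PySem.Int.floordiv k d + 1) s1 else s1) s) j) ∧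
          (l.foldl (fun s d =>
              let s1 := pvReach jump f (PySem.Int.floordiv k d) s
              if PySem.Int.mod k d ≠ 0 then pvReach jump f (PySem.Int.floordiv k d + 1) s1 else s1) s).Nodup ∧
          (∀ d ∈ l, PySem.Int.floordiv k d ∈ l.foldl (fun s d =>
              let s1 := pvReach jump f (PySem.Int.floordiv k d) s
              if PySem.Int.mod k d ≠ 0 then pvReach jump f (PySem.Int.floordiv k d + 1) s1 else s1) s ∧
            (PySem.Int.mod k d ≠ 0 → PySem.Int.floordiv k d + 1 ∈ l.foldl (fun s d =>
              let s1 := pvReach jump f (PySem.Int.floordiv k d) s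
              if PySem.Int.mod k d ≠ 0 then pvReach jump f (PySem.Int.floordiv k d + 1) s1 else s1) s)) := by
        intro l
        induction l with
        | nil =>
          intro hl s hs0' hsE' hnd'
          exact ⟨fun j hj => hj, hs0', hsE', hnd', by simp⟩
        | cons d l ihl =>
          intro hl s hs0' hsE' hnd'
          have hd : 2 ≤ d := hl d (by simp)
          have hk2 : 2 ≤ k := by omega
          obtain ⟨hq0, hqlt, hq1lt⟩ := pvChild_lt hk2 hd
          -- first call
          obtain ⟨m1sub, m1k, m1pos, m1E, m1nd⟩ :=
            ih (PySem.Int.floordiv k d) s (fun j => j = k ∨ E j) hq0 (by omega) hs0' hsE' hnd'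
          set s1 := pvReach jump f (PySem.Int.floordiv k d) s with hs1
          -- second call (conditional)
          have step2 :
              (∀ j ∈ s1, j ∈ (if PySem.Int.mod k d ≠ 0 then pvReach jump f (PySem.Int.floordiv k d + 1) s1 else s1)) ∧
              (∀ j ∈ (if PySem.Int.mod k d ≠ 0 then pvReach jump f (PySem.Int.floordiv k d + 1) s1 else s1), 0 ≤ j) ∧
              (∀ j ∈ (if PySem.Int.mod k d ≠ 0 then pvReach jump f (PySem.Int.floordiv k d + 1) s1 else s1),
                (j = k ∨ E j) ∨ pvOk jump (if PySem.Int.mod k d ≠ 0 then pvReach jump f (PySem.Int.floordiv k d + 1) s1 else s1) j) ∧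
              (if PySem.Int.mod k d ≠ 0 then pvReach jump f (PySem.Int.floordiv k d + 1) s1 else s1).Nodup ∧
              (PySem.Int.mod k d ≠ 0 → PySem.Int.floordiv k d + 1 ∈ (if PySem.Int.mod k d ≠ 0 then pvReach jump f (PySem.Int.floordiv k d + 1) s1 else s1)) := by
            by_cases hm : PySem.Int.mod k d = 0
            · simp only [hm, ne_eq, not_true_eq_false, if_false]
              exact ⟨fun j hj => hj, m1pos, m1E, m1nd, fun h => h.elim⟩
            · have h1 := hq1lt hm
              obtain ⟨m2sub, m2k, m2pos, m2E, m2nd⟩ :=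
                ih (PySem.Int.floordiv k d + 1) s1 (fun j => j = k ∨ E j) (by omega) (by omega) m1pos m1E m1nd
              simp only [hm, ne_eq, not_false_eq_true, if_true]
              exact ⟨m2sub, m2pos, m2E, m2nd, fun _ => m2k⟩
          obtain ⟨m2sub, m2pos, m2E, m2nd, m2q1⟩ := step2
          set s2 := (if PySem.Int.mod k d ≠ 0 then pvReach jump f (PySem.Int.floordiv k d + 1) s1 else s1) with hs2
          obtain ⟨rsub, rpos, rE, rnd, rcl⟩ := ihl (fun d' hd' => hl d' (by simp [hd'])) s2 m2pos m2E m2nd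
          simp only [List.foldl_cons]
          refine ⟨fun j hj => rsub j (m2sub j (m1sub j hj)), rpos, rE, rnd, ?_⟩
          intro d' hd'
          rcases List.mem_cons.mp hd' with rfl | hd'
          · exact ⟨rsub _ (m2sub _ m1k), fun hm => rsub _ (m2q1 hm)⟩
          · exact rcl d' hd'
      have harg1 : ∀ j ∈ PySem.Set.add seen k, 0 ≤ j := by
        intro x hx
        rcases (hmem1 x).mp hx with h | h
        · exact hs0 x h
        · subst h; exact h0
      have harg2 : ∀ j ∈ PySem.Set.add seen k,
          (j = k ∨ E j) ∨ pvOk jump (PySem.Set.add seen k) j := by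
        intro x hx
        rcases (hmem1 x).mp hx with h | h
        · rcases hsE x h with hE | hok
          · exact Or.inl (Or.inr hE)
          · exact Or.inr (pvOk_mono (fun y hy => (hmem1 y).mpr (Or.inl hy)) hok)
        · exact Or.inl (Or.inl h)
      obtain ⟨rsub, rpos, rE, rnd, rcl⟩ := key jump hj (PySem.Set.add seen k) harg1 harg2 hnd1
      have hkin : k ∈ _ := rsub k ((hmem1 k).mpr (Or.inr rfl))
      refine ⟨fun j hj => rsub j ((hmem1 j).mpr (Or.inl hj)), hkin, rpos, ?_, rnd⟩
      intro j hjm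
      rcases rE j hjm with (rfl | hE) | hok
      · exact Or.inr (Or.inr fun d hd => rcl d hd)
      · exact Or.inl hE
      · exact Or.inr hok
    · simp only [if_neg hk1]
      refine ⟨fun j hj => (hmem1 j).mpr (Or.inl hj), (hmem1 k).mpr (Or.inr rfl), ?_, ?_, hnd1⟩
      · intro x hx
        rcases (hmem1 x).mp hx with h | h
        · exact hs0 x h
        · subst h; exact h0
      · intro x hx
        rcases (hmem1 x).mp hx with h | h
        · rcases hsE x h with hE | hok
          · exact Or.inl hE
          · exact Or.inr (pvOk_mono (fun y hy => (hmem1 y).mpr (Or.inl hy)) hok)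
        · subst h; exact Or.inr (Or.inl (by omega))

theorem pvFill_spec (inc dec : Int) (jc : List (Int × Int)) (jump S : List Int)
    (hj : ∀ d ∈ jump, 2 ≤ d) (hjc : ∀ dc ∈ jc, dc.1 ∈ jump)
    (h0S : ∀ j ∈ S, 0 ≤ j) (hokS : ∀ j ∈ S, pvOk jump S j) :
    ∀ L : List Int, ∀ dp : PySem.Dict Int Int,
      L.Pairwise (· < ·) → (∀ j ∈ L, j ∈ S) →
      (∀ j ∈ S, j ∈ L ∨ dp.getD j 0 = pvH inc dec jc j) →
      ∀ j ∈ S, (pvFill inc dec jc L dp).getD j 0 = pvH inc dec jc j := by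
  intro L
  induction L with
  | nil =>
    intro dp _ _ hinv j hjS
    rcases hinv j hjS with h | h
    · simp at h
    · exact h
  | cons k rest ih =>
    intro dp hpw hsub hinv
    have hkS : k ∈ S := hsub k (by simp)
    have hk0 : 0 ≤ k := h0S k hkS
    obtain ⟨hklt, hpw'⟩ := List.pairwise_cons.mp hpw
    -- the value stored for k is pvH k
    have hval : (if k = 0 then dp.insert k 0
        else if k = 1 then dp.insert k inc
        else dp.insert k (jc.foldl (fun r dc =>
          let m := PySem.Int.mod k dc.1
          let r1 := min r (m * inc + dc.2 + dp.getD (PySem.Int.floordiv k dc.1) 0)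
          if m ≠ 0 then
            min r1 ((dc.1 - m) * dec + dc.2 + dp.getD (PySem.Int.floordiv k dc.1 + 1) 0)
          else r1)
          (k * inc))) = dp.insert k (pvH inc dec jc k) := by
      by_cases hk00 : k = 0
      · subst hk00; rw [if_pos rfl, pvH_zero]
      by_cases hk11 : k = 1
      · subst hk11; rw [if_neg (by omega), if_pos rfl, pvH_one]
      have hk2 : 2 ≤ k := by omega
      rw [if_neg hk00, if_neg hk11]
      congr 1
      have hjcd : ∀ dc ∈ jc, 2 ≤ dc.1 := fun dc hdc => hj dc.1 (hjc dc hdc)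
      rw [pvH_recur inc dec jc hjcd hk2]
      refine PySem.List.foldl_congr_mem _ _ _ _ (fun r dc hmem => ?_)
      have hd : 2 ≤ dc.1 := hjcd dc hmem
      obtain ⟨hq0, hqlt, hq1lt⟩ := pvChild_lt hk2 hd
      have hokk := hokS k hkS
      have hch : PySem.Int.floordiv k dc.1 ∈ S ∧
          (PySem.Int.mod k dc.1 ≠ 0 → PySem.Int.floordiv k dc.1 + 1 ∈ S) := by
        rcases hokk with h | h
        · omega
        · exact h dc.1 (hjc dc hmem)
      have hdone : ∀ x : Int, x ∈ S → x < k → dp.getD x 0 = pvH inc dec jc x := by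
        intro x hxS hxk
        rcases hinv x hxS with hx | hx
        · rcases List.mem_cons.mp hx with rfl | hx
          · omega
          · have := hklt x hx; omega
        · exact hx
      have e1 : dp.getD (PySem.Int.floordiv k dc.1) 0 = pvH inc dec jc (PySem.Int.floordiv k dc.1) :=
        hdone _ hch.1 (by omega)
      by_cases hm : PySem.Int.mod k dc.1 = 0
      · simp only [hm, ne_eq, not_true_eq_false, if_false, e1]
      · have h1 := hq1lt hm
        have e2 : dp.getD (PySem.Int.floordiv k dc.1 + 1) 0 = pvH inc dec jc (PySem.Int.floordiv k dc.1 + 1) :=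
          hdone _ (hch.2 hm) (by omega)
        simp only [hm, ne_eq, not_false_eq_true, if_true, e1, e2]
    show ∀ j ∈ S, (pvFill inc dec jc rest _).getD j 0 = pvH inc dec jc j
    rw [hval]
    refine ih (dp.insert k (pvH inc dec jc k)) hpw' (fun j hj' => hsub j (by simp [hj'])) ?_
    intro j hjS'
    by_cases hjk : j = k
    · subst hjk
      right
      rw [PySem.Dict.getD_insert]
      simp
    · rcases hinv j hjS' with hx | hx
      · rcases List.mem_cons.mp hx with rfl | hx
        · exact absurd rfl hjk
        · exact Or.inl hx
      · right
        rw [PySem.Dict.getD_insert, if_neg hjk]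
        exact hx

theorem pvPairwise_lt {L : List Int} (h1 : L.Pairwise (· ≤ ·)) (h2 : L.Nodup) :
    L.Pairwise (· < ·) :=
  (h1.and h2).imp fun h => lt_of_le_of_ne h.1 h.2

-- ===== VERDICT (by name: the statement is the Claim_ definition above) =====
theorem busRapidTransit_spec : Claim_equal_busRapidTransit := by
  intro target inc dec jump cost _ hPre
  rcases hPre with ⟨ht0, hj⟩ | h0 | h1 | hnil
  case inr.inl =>
    subst h0; rfl
  case inr.inr.inl =>
    subst h1; rfl
  case inr.inr.inr =>
    subst hnil
    unfold Spec_busRapidTransit busRapidTransit busRapidTransit_alt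
    by_cases h0 : target = 0
    · subst h0; rfl
    by_cases h1 : target = 1
    · subst h1; rfl
    have hA : pvHelperA inc dec (List.zip [] cost) (target.toNat + 1) target = target * inc := by
      simp [pvHelperA, h0, h1]
    have hR : pvReach [] (target.toNat + 1) target PySem.Set.empty = [target] := by
      simp [pvReach, PySem.Set.empty, PySem.Set.add, PySem.Set.contains]
    have hF : (pvFill inc dec (List.zip [] cost) [target] PySem.Dict.empty).getD target 0
        = target * inc := by
      simp [pvFill, h0, h1, PySem.Dict.getD_insert]
    show PySem.Int.mod (pvHelperA inc dec (List.zip [] cost) (target.toNat + 1) target) 1000000007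
        = PySem.Int.mod ((pvFill inc dec (List.zip [] cost)
            (PySem.List.sorted (pvReach [] (target.toNat + 1) target PySem.Set.empty) (fun x => x) false)
            PySem.Dict.empty).getD target 0) 1000000007
    rw [hA, hR]
    rw [show PySem.List.sorted [target] (fun x => x) false = [target] from rfl, hF]
  unfold Spec_busRapidTransit busRapidTransit busRapidTransit_alt
  obtain ⟨_, hTin, hpos, hok, hnd⟩ :=
    pvReach_spec jump hj (target.toNat + 1) target PySem.Set.empty (fun _ => False)
      ht0 (by omega) (by simp [PySem.Set.empty]) (by simp [PySem.Set.empty])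
      (by simp [PySem.Set.empty])
  set S := pvReach jump (target.toNat + 1) target PySem.Set.empty with hS
  have hokS : ∀ j ∈ S, pvOk jump S j := fun j hjm => (hok j hjm).resolve_left id
  set L := PySem.List.sorted S (fun x => x) false with hL
  have hperm : L.Perm S := PySem.List.sorted_perm S (fun x => x) false
  have hLpw : L.Pairwise (· < ·) :=
    pvPairwise_lt (PySem.List.sorted_pairwise S (fun x => x)) (hperm.nodup_iff.mpr hnd)
  have hmemL : ∀ j, j ∈ L ↔ j ∈ S := fun j => hperm.mem_iff
  have hjc : ∀ dc ∈ jump.zip cost, dc.1 ∈ jump := by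
    intro dc hdc
    obtain ⟨d, c⟩ := dc
    exact (List.of_mem_zip hdc).1
  have hfill := pvFill_spec inc dec (jump.zip cost) jump S hj hjc hpos hokS L
    PySem.Dict.empty hLpw (fun j hj' => (hmemL j).mp hj')
    (fun j hjS => Or.inl ((hmemL j).mpr hjS)) target hTin
  show PySem.Int.mod (pvHelperA inc dec (jump.zip cost) (target.toNat + 1) target) 1000000007
      = PySem.Int.mod ((pvFill inc dec (jump.zip cost) L PySem.Dict.empty).getD target 0) 1000000007
  rw [hfill]
  rfl
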